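-- pv_equiv track=rewrite | github.com/kkb00714/Basic-Coding-Test | 프로그래머스/unrated/181931. 등차수열의 특정한 항만 더하기/등차수열의 특정한 항만 더하기.py | solution
-- ===== SOURCE A (Python) =====
-- def solution(a, d, included):
--     answer = 0
--     numerical = a
--
--     for i in range(len(included)):
--         if included[i]:
--             answer += numerical
--         numerical += d
--         # 다음 항으로 이동
--
--     return answer
-- ===== SOURCE B (Python) =====
-- def solution(a, d, included):
--     count = included.count(True)
--     idx_sum = sum(i for i, f in enumerate(included) if f)
--     return a * count + d * idx_sum
-- ===== Notes on version B (the rewrite author's own statement) =====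
-- stated objective: simpler
-- what changed: Replaces the running-term loop (answer/numerical updated each step) by the closed form a*count + d*idx_sum computed from two aggregates of the included flags.
import Mathlib
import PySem

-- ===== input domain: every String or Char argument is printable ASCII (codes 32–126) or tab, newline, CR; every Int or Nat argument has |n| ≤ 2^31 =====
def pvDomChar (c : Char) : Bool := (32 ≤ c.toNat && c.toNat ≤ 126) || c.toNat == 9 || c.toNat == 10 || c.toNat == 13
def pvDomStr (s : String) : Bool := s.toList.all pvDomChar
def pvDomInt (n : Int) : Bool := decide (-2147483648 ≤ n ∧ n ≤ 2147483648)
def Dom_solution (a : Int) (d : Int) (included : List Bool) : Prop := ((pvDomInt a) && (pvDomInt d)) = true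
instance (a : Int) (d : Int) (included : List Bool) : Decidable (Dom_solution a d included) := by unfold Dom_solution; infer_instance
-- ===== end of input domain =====

-- B replaces A's running-term loop by the closed form a*count + d*idx_sum (simpler decomposition, same O(n) cost).

-- ===== PORT A =====
def solution (a : Int) (d : Int) (included : List Bool) : Int :=
  ((PySem.List.pyRange 0 (included.length : Int) 1).foldl
    (fun st i =>
      (if PySem.List.pyGetD included i false then st.1 + st.2 else st.1, st.2 + d))
    (0, a)).1

-- ===== PORT B =====
def solution_alt (a : Int) (d : Int) (included : List Bool) : Int :=
  let count : Int := (included.count true : Int)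
  let idxSum : Int :=
    (PySem.List.enumerate included 0).foldl
      (fun s p => if p.2 then s + p.1 else s) 0
  a * count + d * idxSum

-- ===== PRECONDITION & SPEC =====
def Spec_solution (a : Int) (d : Int) (included : List Bool) (out : Int) : Prop := out = solution_alt a d included
instance (a : Int) (d : Int) (included : List Bool) (out : Int) : Decidable (Spec_solution a d included out) := by unfold Spec_solution; infer_instance

-- ===== CLAIM (what is proved, stated in full; the proofs are below) =====
def Claim_equal_solution : Prop := ∀ (a : Int) (d : Int) (included : List Bool), Dom_solution a d included → Spec_solution a d included (solution a d included)

-- ===== LEMMAS AND PROOFS =====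

-- B's generator-sum with a shifted initial accumulator
lemma enumFold_init (l : List Bool) : ∀ (s i : Int),
    (PySem.List.enumerate l s).foldl (fun acc p => if p.2 then acc + p.1 else acc) i
      = i + (PySem.List.enumerate l s).foldl (fun acc p => if p.2 then acc + p.1 else acc) 0 := by
  induction l with
  | nil => intro s i; simp [PySem.List.enumerate_nil]
  | cons x xs ih =>
    intro s i
    simp only [PySem.List.enumerate_cons, List.foldl_cons]
    rw [ih (s+1), ih (s+1) (if x then 0 + s else 0)]
    cases x <;> simp <;> ring

-- A's loop equals B's closed form, generalized over accumulator, running term and start index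
lemma loop_closed (d : Int) (l : List Bool) : ∀ (ans num s : Int),
    (l.foldl (fun st x => (if x then st.1 + st.2 else st.1, st.2 + d)) (ans, num)).1
      = ans + num * (l.count true : Int)
        + d * ((PySem.List.enumerate l s).foldl (fun acc p => if p.2 then acc + p.1 else acc) 0
               - s * (l.count true : Int)) := by
  induction l with
  | nil => intro ans num s; simp [PySem.List.enumerate_nil]
  | cons x xs ih =>
    intro ans num s
    cases x
    · simp only [PySem.List.enumerate_cons, List.foldl_cons, List.count_cons]
      rw [ih _ _ (s+1)]
      push_cast
      simp
      ring
    · simp only [PySem.List.enumerate_cons, List.foldl_cons, List.count_cons]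
      rw [ih _ _ (s+1)]
      simp only [if_pos, zero_add]
      rw [enumFold_init xs (s+1) s]
      push_cast
      simp
      ring

-- ===== VERDICT (by name: the statement is the Claim_ definition above) =====
theorem solution_spec : Claim_equal_solution := by
  intro a d included _
  unfold Spec_solution solution solution_alt
  rw [PySem.List.foldl_pyRange_zero_pyGetD' included false
        (fun st v => (if v then st.1 + st.2 else st.1, st.2 + d)) ((0 : Int), a)]
  rw [loop_closed d included 0 a 0]
  push_cast
  ring
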